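-- pv_equiv track=rewrite | github.com/aaavril/Ejercicios-Introductorios-Python | 117tuplas.py | nombres
-- ===== SOURCE A (Python) =====
-- def nombres(listaNombres):
--   # creo variables para sumar la cantidad de nombres que empiezan con cada letra
--   ctdNombresP = 0
--   ctdNombresM = 0
--   ctdNombresA = 0
--   ctdNombresC = 0
--
--   # recorremos los nombres y verificamos la primera letra de cada nombre. Si corresponde a una P, M, A o C sumo 1 a la variable correspondiente
--   for nombre in listaNombres:
--     if nombre[0] == 'P' or nombre[0] == 'p':
--       ctdNombresP += 1
--     elif nombre[0] == 'M' or nombre[0] == 'm':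
--       ctdNombresM += 1
--     elif nombre[0] == 'A' or nombre[0] == 'a':
--       ctdNombresA += 1
--     elif nombre[0] == 'C' or nombre[0] == 'c':
--       ctdNombresC += 1
--
--
--   # devuelvo una tupla con los valores de las variables anteriores
--   return (ctdNombresP, ctdNombresM, ctdNombresA, ctdNombresC)
-- ===== SOURCE B (Python) =====
-- def nombres(listaNombres):
--   # stage 1: one map pass extracting each name's first letter, lowercased
--   primeras = [nombre[0].lower() for nombre in listaNombres]
--   # stage 2: four independent count scans over the extracted letters
--   return (primeras.count('p'), primeras.count('m'),
--           primeras.count('a'), primeras.count('c'))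
-- ===== Notes on version B (the rewrite author's own statement) =====
-- stated objective: alternative
-- what changed: Replaces A's single fold maintaining four branch counters with a staged pipeline: a map pass extracting the lowercased first letters, then four independent .count scans over that list.
import Mathlib
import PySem

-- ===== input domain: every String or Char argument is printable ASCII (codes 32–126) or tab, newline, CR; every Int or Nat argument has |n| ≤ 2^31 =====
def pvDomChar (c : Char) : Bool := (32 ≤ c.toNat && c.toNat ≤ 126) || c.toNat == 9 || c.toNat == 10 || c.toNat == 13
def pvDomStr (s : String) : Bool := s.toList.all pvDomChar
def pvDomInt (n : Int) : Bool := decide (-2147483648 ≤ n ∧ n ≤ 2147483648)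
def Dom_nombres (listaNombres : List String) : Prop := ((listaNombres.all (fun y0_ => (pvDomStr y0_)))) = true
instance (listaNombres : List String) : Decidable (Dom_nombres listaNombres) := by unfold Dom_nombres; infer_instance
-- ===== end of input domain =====

-- B replaces A's single fold with four branch counters by a staged pipeline: a map pass
-- extracting the lowercased first letters, then four independent count scans (alternative
-- decomposition, same cost).

-- ===== PORT A =====
def nombresStep (st : Int × Int × Int × Int) (nombre : String) : Int × Int × Int × Int :=
  match PySem.Str.pyGet? nombre 0 with
  | none => st   -- Python raises IndexError here; excluded by Pre_nombres
  | some ch =>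
    if ch = 'P' ∨ ch = 'p' then (st.1 + 1, st.2.1, st.2.2.1, st.2.2.2)
    else if ch = 'M' ∨ ch = 'm' then (st.1, st.2.1 + 1, st.2.2.1, st.2.2.2)
    else if ch = 'A' ∨ ch = 'a' then (st.1, st.2.1, st.2.2.1 + 1, st.2.2.2)
    else if ch = 'C' ∨ ch = 'c' then (st.1, st.2.1, st.2.2.1, st.2.2.2 + 1)
    else st

def nombres (listaNombres : List String) : Int × Int × Int × Int :=
  listaNombres.foldl nombresStep (0, 0, 0, 0)

-- ===== PORT B =====
-- nombre[0].lower(): a one-character Python string, ported as a Char via lowerChar (exact)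
def nombresAltFirst (nombre : String) : Char :=
  match PySem.Str.pyGet? nombre 0 with
  | none => ' '   -- Python raises IndexError here; excluded by Pre_nombres
  | some c => PySem.Chars.lowerChar c

def nombres_alt (listaNombres : List String) : Int × Int × Int × Int :=
  let primeras := listaNombres.map nombresAltFirst
  ((PySem.List.count primeras 'p' : Int), (PySem.List.count primeras 'm' : Int),
   (PySem.List.count primeras 'a' : Int), (PySem.List.count primeras 'c' : Int))

-- ===== PRECONDITION & SPEC =====
-- Pre_ excludes lists containing an empty name, on which A raises IndexError at nombre[0].
def Pre_nombres (listaNombres : List String) : Prop := ∀ s ∈ listaNombres, s ≠ ""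
instance (listaNombres : List String) : Decidable (Pre_nombres listaNombres) := by
  unfold Pre_nombres; infer_instance
def pvWitness_nombres : List String := ["Pedro", "maria", "Ana", "carlos", "Zoe"]
def Spec_nombres (listaNombres : List String) (out : Int × Int × Int × Int) : Prop := out = nombres_alt listaNombres
instance (listaNombres : List String) (out : Int × Int × Int × Int) : Decidable (Spec_nombres listaNombres out) := by unfold Spec_nombres; infer_instance

-- ===== CLAIM (what is proved, stated in full; the proofs are below) =====
def Claim_equal_nombres : Prop := ∀ (listaNombres : List String), Dom_nombres listaNombres → Pre_nombres listaNombres → Spec_nombres listaNombres (nombres listaNombres)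

-- ===== LEMMAS AND PROOFS =====
lemma pvCharEq (a b : Char) (h : a.toNat = b.toNat) : a = b :=
  Char.ext (UInt32.toNat_inj.mp h)

lemma pvStep_none (st : Int × Int × Int × Int) (n : String)
    (h : PySem.Str.pyGet? n 0 = none) : nombresStep st n = st := by
  unfold nombresStep; rw [h]

lemma pvStep_some (st : Int × Int × Int × Int) (n : String) (ch : Char)
    (h : PySem.Str.pyGet? n 0 = some ch) :
    nombresStep st n =
      (if ch = 'P' ∨ ch = 'p' then (st.1 + 1, st.2.1, st.2.2.1, st.2.2.2)
       else if ch = 'M' ∨ ch = 'm' then (st.1, st.2.1 + 1, st.2.2.1, st.2.2.2)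
       else if ch = 'A' ∨ ch = 'a' then (st.1, st.2.1, st.2.2.1 + 1, st.2.2.2)
       else if ch = 'C' ∨ ch = 'c' then (st.1, st.2.1, st.2.2.1, st.2.2.2 + 1)
       else st) := by
  unfold nombresStep; rw [h]

lemma pvFirst_none (n : String) (h : PySem.Str.pyGet? n 0 = none) :
    nombresAltFirst n = ' ' := by
  unfold nombresAltFirst; rw [h]

lemma pvFirst_some (n : String) (ch : Char) (h : PySem.Str.pyGet? n 0 = some ch) :
    nombresAltFirst n = PySem.Chars.lowerChar ch := by
  unfold nombresAltFirst; rw [h]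

-- lowerChar hits a lowercase letter lo exactly on lo itself and its uppercase partner hi
lemma pvLower_eq (c lo hi : Char) (h1 : lo.toNat = hi.toNat + 32)
    (h2 : 65 ≤ hi.toNat) (h3 : hi.toNat ≤ 90) :
    PySem.Chars.lowerChar c = lo ↔ (c = hi ∨ c = lo) := by
  have hA65 : ('A' : Char).val.toNat = 65 := by decide
  have hZ90 : ('Z' : Char).val.toNat = 90 := by decide
  simp only [PySem.Chars.lowerChar, PySem.Chars.isupper, Bool.and_eq_true, decide_eq_true_eq]
  split_ifs with hu
  · obtain ⟨h4, h5⟩ := hu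
    rw [Char.le_def, UInt32.le_iff_toNat_le, hA65] at h4
    rw [Char.le_def, UInt32.le_iff_toNat_le, hZ90] at h5
    have hcv : c.toNat = c.val.toNat := rfl
    have hvalid : Nat.isValidChar (c.toNat + 32) := by
      unfold Nat.isValidChar; left
      show c.toNat + 32 < 55296
      omega
    have hv : (Char.ofNat (c.toNat + 32)).toNat = c.toNat + 32 := by
      rw [Char.toNat_ofNat, if_pos hvalid]
    constructor
    · intro he
      have h6 : lo.toNat = c.toNat + 32 := by rw [← he, hv]
      exact Or.inl (pvCharEq c hi (by omega))
    · rintro (rfl | rfl)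
      · exact pvCharEq _ _ (by rw [hv]; omega)
      · exfalso; omega
  · constructor
    · intro he; exact Or.inr he
    · rintro (rfl | rfl)
      · exfalso
        refine hu ⟨?_, ?_⟩
        · rw [Char.le_def, UInt32.le_iff_toNat_le, hA65]; exact h2
        · rw [Char.le_def, UInt32.le_iff_toNat_le, hZ90]; exact h3
      · rfl

lemma pvLower_p (c : Char) : PySem.Chars.lowerChar c = 'p' ↔ (c = 'P' ∨ c = 'p') :=
  pvLower_eq c 'p' 'P' (by decide) (by decide) (by decide)
lemma pvLower_m (c : Char) : PySem.Chars.lowerChar c = 'm' ↔ (c = 'M' ∨ c = 'm') :=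
  pvLower_eq c 'm' 'M' (by decide) (by decide) (by decide)
lemma pvLower_a (c : Char) : PySem.Chars.lowerChar c = 'a' ↔ (c = 'A' ∨ c = 'a') :=
  pvLower_eq c 'a' 'A' (by decide) (by decide) (by decide)
lemma pvLower_c (c : Char) : PySem.Chars.lowerChar c = 'c' ↔ (c = 'C' ∨ c = 'c') :=
  pvLower_eq c 'c' 'C' (by decide) (by decide) (by decide)

-- the loop invariant: A's fold from (a,b,c,d) adds B's four counts componentwise
lemma pvLoop (l : List String) (a b c d : Int) :
    l.foldl nombresStep (a, b, c, d) =
      (a + ((l.map nombresAltFirst).count 'p' : Int),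
       b + ((l.map nombresAltFirst).count 'm' : Int),
       c + ((l.map nombresAltFirst).count 'a' : Int),
       d + ((l.map nombresAltFirst).count 'c' : Int)) := by
  induction l generalizing a b c d with
  | nil => simp
  | cons n l ih =>
    simp only [List.foldl_cons, List.map_cons, List.count_cons]
    cases h : PySem.Str.pyGet? n 0 with
    | none =>
      rw [pvStep_none _ _ h, pvFirst_none _ h, ih]
      simp
    | some ch =>
      rw [pvStep_some _ _ _ h, pvFirst_some _ _ h]
      by_cases hp : ch = 'P' ∨ ch = 'p'
      · rw [if_pos hp, ih, (pvLower_p ch).mpr hp]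
        simp only [Prod.mk.injEq, beq_iff_eq]
        norm_num
        omega
      · by_cases hm : ch = 'M' ∨ ch = 'm'
        · rw [if_neg hp, if_pos hm, ih, (pvLower_m ch).mpr hm]
          simp only [Prod.mk.injEq, beq_iff_eq]
          norm_num
          omega
        · by_cases ha : ch = 'A' ∨ ch = 'a'
          · rw [if_neg hp, if_neg hm, if_pos ha, ih, (pvLower_a ch).mpr ha]
            simp only [Prod.mk.injEq, beq_iff_eq]
            norm_num
            omega
          · by_cases hc : ch = 'C' ∨ ch = 'c'
            · rw [if_neg hp, if_neg hm, if_neg ha, if_pos hc, ih, (pvLower_c ch).mpr hc]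
              simp only [Prod.mk.injEq, beq_iff_eq]
              norm_num
              omega
            · have np : ¬ PySem.Chars.lowerChar ch = 'p' := fun he => hp ((pvLower_p ch).mp he)
              have nm : ¬ PySem.Chars.lowerChar ch = 'm' := fun he => hm ((pvLower_m ch).mp he)
              have na : ¬ PySem.Chars.lowerChar ch = 'a' := fun he => ha ((pvLower_a ch).mp he)
              have nc : ¬ PySem.Chars.lowerChar ch = 'c' := fun he => hc ((pvLower_c ch).mp he)
              rw [if_neg hp, if_neg hm, if_neg ha, if_neg hc, ih]
              simp [np, nm, na, nc]

-- ===== VERDICT (by name: the statement is the Claim_ definition above) =====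
theorem nombres_spec : Claim_equal_nombres := by
  intro l _ _
  unfold Spec_nombres nombres nombres_alt
  rw [pvLoop]
  simp [PySem.List.count_eq]
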